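-- pv_equiv track=rewrite | github.com/pypi-data/pypi-mirror-195 | packages/garbledave-package/garbledave_package-1.0.0.tar.gz/garbledave_package-1.0.0/src/garbledave_package/garbledave.py | garbleit
-- ===== SOURCE A (Python) =====
-- def garbleit(prm):
-- 	newstr = ''
-- 	for i in range(0,len(prm)):
-- 		onechar = prm[i]
--
-- 		if 'abcdefghijklmnopqrstuvwxyz'.find(onechar) > -1:
-- 			if onechar == 'z':
-- 				onechar = 'a'
-- 			else:
-- 				onechar = chr(ord(onechar)+1)
-- 		elif  'ABCDEFGHIJKLMNOPQRSTUVWXYZ'.find(onechar) > -1: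
-- 			if onechar == 'Z':
-- 				onechar = 'A'
-- 			else:
-- 				onechar = chr(ord(onechar)+1)
-- 		elif  '0123456789'.find(onechar) > -1:
-- 			if onechar == '9':
-- 				onechar = '0'
-- 			else:
-- 				onechar = chr(ord(onechar)+1)
--
-- 		newstr += onechar
--
-- 	return newstr
-- ===== SOURCE B (Python) =====
-- _SRC = 'abcdefghijklmnopqrstuvwxyzABCDEFGHIJKLMNOPQRSTUVWXYZ0123456789'
-- _DST = 'bcdefghijklmnopqrstuvwxyzaBCDEFGHIJKLMNOPQRSTUVWXYZA1234567890'
-- _TABLE = str.maketrans(_SRC, _DST)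
--
-- def garbleit(prm):
--     return prm.translate(_TABLE)
-- ===== Notes on version B (the rewrite author's own statement) =====
-- stated objective: idiomatic
-- what changed: Replaces the hand-written per-character scan with three substring-find branches by a precomputed translation table (str.maketrans) applied in a single str.translate call.
import Mathlib
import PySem

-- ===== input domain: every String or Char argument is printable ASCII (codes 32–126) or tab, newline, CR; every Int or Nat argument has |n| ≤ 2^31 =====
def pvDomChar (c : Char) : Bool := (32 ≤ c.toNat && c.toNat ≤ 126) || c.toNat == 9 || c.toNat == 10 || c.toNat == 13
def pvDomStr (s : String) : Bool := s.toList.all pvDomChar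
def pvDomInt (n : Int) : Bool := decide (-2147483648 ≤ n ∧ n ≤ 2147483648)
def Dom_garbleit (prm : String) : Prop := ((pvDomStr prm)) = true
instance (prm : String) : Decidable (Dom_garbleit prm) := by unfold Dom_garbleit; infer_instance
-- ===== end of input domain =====

-- B replaces A's per-character branch-and-scan loop with a precomputed translation table applied in one pass (idiomatic).


-- ===== PORT A =====
-- per-iteration body of A's loop: the three find-branches on one character
def garbleStep (onechar : Char) : Char :=
  if PySem.Str.find "abcdefghijklmnopqrstuvwxyz" (String.singleton onechar) > -1 then
    if onechar = 'z' then 'a' else Char.ofNat (onechar.toNat + 1)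
  else if PySem.Str.find "ABCDEFGHIJKLMNOPQRSTUVWXYZ" (String.singleton onechar) > -1 then
    if onechar = 'Z' then 'A' else Char.ofNat (onechar.toNat + 1)
  else if PySem.Str.find "0123456789" (String.singleton onechar) > -1 then
    if onechar = '9' then '0' else Char.ofNat (onechar.toNat + 1)
  else onechar

def garbleit (prm : String) : String :=
  String.mk (prm.toList.foldl (fun newstr onechar => newstr ++ [garbleStep onechar]) [])

-- ===== PORT B =====
-- the fixed translation table built once from the two strings (Source B's str.maketrans)
def garbleTable : List (Char × Char) :=
  "abcdefghijklmnopqrstuvwxyzABCDEFGHIJKLMNOPQRSTUVWXYZ0123456789".toList.zip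
  "bcdefghijklmnopqrstuvwxyzaBCDEFGHIJKLMNOPQRSTUVWXYZA1234567890".toList

def garbleit_alt (prm : String) : String :=
  String.mk (prm.toList.map (fun c => (garbleTable.lookup c).getD c))

-- ===== PRECONDITION & SPEC =====
def Spec_garbleit (prm : String) (out : String) : Prop := out = garbleit_alt prm
instance (prm : String) (out : String) : Decidable (Spec_garbleit prm out) := by unfold Spec_garbleit; infer_instance

-- ===== CLAIM (what is proved, stated in full; the proofs are below) =====
def Claim_equal_garbleit : Prop := ∀ (prm : String), Dom_garbleit prm → Spec_garbleit prm (garbleit prm)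

-- ===== LEMMAS AND PROOFS =====
set_option maxRecDepth 4000 in
theorem garbleStep_eq_table : ∀ n < 128, garbleStep (Char.ofNat n) = ((garbleTable.lookup (Char.ofNat n)).getD (Char.ofNat n)) := by
  decide

theorem foldl_append_singleton_eq_map (f : Char → Char) :
    ∀ (l acc : List Char), l.foldl (fun s c => s ++ [f c]) acc = acc ++ l.map f := by
  intro l
  induction l with
  | nil => simp
  | cons c t ih => intro acc; simp [List.foldl, ih]

-- ===== VERDICT (by name: the statement is the Claim_ definition above) =====
theorem garbleit_spec : Claim_equal_garbleit := by
  intro prm hdom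
  unfold Spec_garbleit garbleit garbleit_alt
  rw [foldl_append_singleton_eq_map]
  simp only [List.nil_append]
  congr 1
  apply List.map_congr_left
  intro c hc
  have hd : pvDomChar c = true := by
    have := (List.all_eq_true).1 hdom
    exact this c hc
  have hlt : c.toNat < 128 := by
    unfold pvDomChar at hd
    simp only [Bool.or_eq_true, Bool.and_eq_true, decide_eq_true_eq, beq_iff_eq] at hd
    omega
  have := garbleStep_eq_table c.toNat hlt
  simpa [Char.ofNat_toNat] using this
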